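-- pv_equiv track=rewrite | github.com/XanderBezuidenhout/EDC310-Digital-Communications | LempelZiv.py | LempelZivEncodeChar
-- ===== SOURCE A (Python) =====
-- def LempelZivEncodeChar(Data):
--     """@brief: Encodes a string using the Lempel-Ziv algorithm.
--     @param Data: The string to be encoded.
--     @return: A list of encoded binary strings and a list of unique data pieces."""
--     #Dictionary is entry of unique datapieces
--     FullString=Data
--     SubSet=""
--     codewords=[]
--     dictionary=[]
--     #CREATE DICTIONARY AND POPULATE UNIQUE CODEWORDS
--     LastIndex=0
--     while (len(FullString)>0):
--         SubSet+=FullString[0]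
--         FullString=FullString[1:]
--         if (SubSet not in dictionary):
--             dictionary.append(SubSet)
--             codewords.append(str(LastIndex)+SubSet[-1])
--             SubSet=""
--             LastIndex=0
--         else:
--             LastIndex=dictionary.index(SubSet)+1
--     if (SubSet!=""):#last non-unique data left
--         codewords.append(str(LastIndex)+SubSet[-1])
--         SubSet=""
--
--     return [codewords,dictionary]
-- ===== SOURCE B (Python) =====
-- def LempelZivEncodeChar(Data):
--     """LZ78 encode via a trie kept as a dict keyed by (parent index, char):
--     one dict lookup per character instead of scanning the dictionary list."""
--     children = {}          # (parent index, char) -> 1-based dictionary index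
--     codewords = []
--     dictionary = []
--     current = 0            # index of the phrase matched so far (0 = root/empty)
--     last = ''              # last character consumed while matching
--     for ch in Data:
--         key = (current, ch)
--         if key in children:
--             current = children[key]
--             last = ch
--         else:
--             children[key] = len(dictionary) + 1
--             dictionary.append(('' if current == 0 else dictionary[current - 1]) + ch)
--             codewords.append(str(current) + ch)
--             current = 0
--     if current != 0:       # flush the pending partial match
--         codewords.append(str(current) + last)
--     return [codewords, dictionary]
-- ===== Notes on version B (the rewrite author's own statement) =====
-- stated objective: faster
-- what changed: Replaces the per-character dictionary membership scan and repeated list.index passes with a trie kept as a dict keyed by parent-index-and-char pairs, so each character costs one hash lookup instead of a scan over all phrases.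
import Mathlib
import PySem

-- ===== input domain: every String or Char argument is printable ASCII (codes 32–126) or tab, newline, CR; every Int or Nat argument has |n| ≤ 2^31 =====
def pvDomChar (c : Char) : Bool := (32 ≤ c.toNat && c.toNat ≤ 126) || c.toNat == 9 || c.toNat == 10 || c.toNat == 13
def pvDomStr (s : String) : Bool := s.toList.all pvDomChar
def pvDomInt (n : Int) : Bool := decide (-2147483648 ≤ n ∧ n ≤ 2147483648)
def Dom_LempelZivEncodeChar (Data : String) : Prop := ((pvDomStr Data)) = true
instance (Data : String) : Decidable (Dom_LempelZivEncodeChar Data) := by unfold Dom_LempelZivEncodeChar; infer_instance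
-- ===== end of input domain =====

-- B replaces A's per-character dictionary scans (membership + .index) with a trie kept as a
-- dict keyed by (parent index, char): one lookup per character (objective: faster).

-- ===== PORT A =====
-- SubSet[-1]; exact at every use site: A only reads SubSet[-1] when SubSet is nonempty
def pvLastD (l : List Char) : Char := l.getLast?.getD ' '

-- A's while-loop; state = (SubSet, codewords, dictionary, LastIndex); returns (codewords, dictionary, SubSet, LastIndex)
def pvALoop : List Char → List Char → List (List Char) → List (List Char) → Int →
    List (List Char) × List (List Char) × List Char × Int
  | [], subSet, codewords, dictionary, lastIndex => (codewords, dictionary, subSet, lastIndex)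
  | c :: rest, subSet, codewords, dictionary, lastIndex =>
    let subSet' := subSet ++ [c]
    if subSet' ∉ dictionary then
      pvALoop rest [] (codewords ++ [PySem.Int.toChars lastIndex ++ [pvLastD subSet']])
        (dictionary ++ [subSet']) 0
    else
      -- dictionary.index(SubSet)+1; the else-branch guarantees membership, so .getD 0 is never the fallback
      pvALoop rest subSet' codewords dictionary
        (((PySem.List.index? dictionary subSet').getD 0 : Nat) + 1)

def LempelZivEncodeChar (Data : String) : List (List String) :=
  match pvALoop Data.toList [] [] [] 0 with
  | (codewords, dictionary, subSet, lastIndex) =>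
    let codewords := if subSet ≠ [] then
        codewords ++ [PySem.Int.toChars lastIndex ++ [pvLastD subSet]] else codewords
    [codewords.map String.ofList, dictionary.map String.ofList]

-- ===== PORT B =====
-- Source B's for-loop; state = (children, codewords, dictionary, current, last)
def pvBLoop : List Char → PySem.Dict (Int × Char) Int → List (List Char) → List (List Char) →
    Int → Char →
    PySem.Dict (Int × Char) Int × List (List Char) × List (List Char) × Int × Char
  | [], children, codewords, dictionary, current, last =>
      (children, codewords, dictionary, current, last)
  | ch :: rest, children, codewords, dictionary, current, last =>
    if (children.get? (current, ch)).isSome then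
      pvBLoop rest children codewords dictionary ((children.get? (current, ch)).getD 0) ch
    else
      pvBLoop rest (children.insert (current, ch) ((dictionary.length : Int) + 1))
        (codewords ++ [PySem.Int.toChars current ++ [ch]])
        -- dictionary[current-1]: in range whenever current ≠ 0 here, so .getD [] is never the fallback
        (dictionary ++ [(if current = 0 then [] else
            (PySem.List.pyGet? dictionary (current - 1)).getD []) ++ [ch]])
        0 last

def LempelZivEncodeChar_alt (Data : String) : List (List String) :=
  match pvBLoop Data.toList PySem.Dict.empty [] [] 0 ' ' with
  | (_, codewords, dictionary, current, last) =>
    let codewords := if current ≠ 0 then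
        codewords ++ [PySem.Int.toChars current ++ [last]] else codewords
    [codewords.map String.ofList, dictionary.map String.ofList]

-- ===== PRECONDITION & SPEC =====
def Spec_LempelZivEncodeChar (Data : String) (out : List (List String)) : Prop := out = LempelZivEncodeChar_alt Data
instance (Data : String) (out : List (List String)) : Decidable (Spec_LempelZivEncodeChar Data out) := by unfold Spec_LempelZivEncodeChar; infer_instance

-- ===== CLAIM (what is proved, stated in full; the proofs are below) =====
def Claim_equal_LempelZivEncodeChar : Prop := ∀ (Data : String), Dom_LempelZivEncodeChar Data → Spec_LempelZivEncodeChar Data (LempelZivEncodeChar Data)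

-- ===== LEMMAS AND PROOFS =====

-- the phrase a (1-based) dictionary index denotes; 0 = the empty phrase
def pvPhrase (dict : List (List Char)) (p : Int) : List Char :=
  if p = 0 then [] else dict.getD (p - 1).toNat []

-- the coupling invariant between A's state (sub, cur as LastIndex) and B's (tb, lb)
structure PvInv (tb : PySem.Dict (Int × Char) Int) (dict : List (List Char))
    (sub : List Char) (cur : Int) (lb : Char) : Prop where
  h0a : 0 ≤ cur
  h0b : cur ≤ (dict.length : Int)
  h1 : dict.Nodup
  h2 : ∀ s ∈ dict, s ≠ []
  h3 : sub = pvPhrase dict cur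
  h4 : sub ≠ [] → pvLastD sub = lb
  h5 : ∀ (p : Int) (c : Char), 0 ≤ p → p ≤ (dict.length : Int) →
        tb.get? (p, c) = (PySem.List.index? dict (pvPhrase dict p ++ [c])).map
          (fun j => ((j : Int) + 1))
  h6 : ∀ (p : Int) (c : Char), (tb.get? (p, c)).isSome → 0 ≤ p ∧ p ≤ (dict.length : Int)
  h7 : ∀ s ∈ dict, s.dropLast = [] ∨ s.dropLast ∈ dict

def pvRel (a : List (List Char) × List (List Char) × List Char × Int)
    (b : PySem.Dict (Int × Char) Int × List (List Char) × List (List Char) × Int × Char) :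
    Prop :=
  a.1 = b.2.1 ∧ a.2.1 = b.2.2.1 ∧ a.2.2.2 = b.2.2.2.1 ∧
    PvInv b.1 b.2.2.1 a.2.2.1 b.2.2.2.1 b.2.2.2.2

theorem pvPhrase_mem {dict : List (List Char)} {p : Int} (h0 : 0 ≤ p)
    (h1 : p ≤ (dict.length : Int)) (h2 : p ≠ 0) : pvPhrase dict p ∈ dict := by
  unfold pvPhrase
  rw [if_neg h2]
  have hlt : (p - 1).toNat < dict.length := by omega
  rw [List.getD_eq_getElem _ _ hlt]
  exact List.getElem_mem _

theorem pvPhrase_ne_nil {dict : List (List Char)} {p : Int} (h0 : 0 ≤ p)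
    (h1 : p ≤ (dict.length : Int)) (h2 : ∀ s ∈ dict, s ≠ []) :
    pvPhrase dict p = [] ↔ p = 0 := by
  constructor
  · intro h
    by_contra hp
    exact h2 _ (pvPhrase_mem h0 h1 hp) h
  · intro h; simp [pvPhrase, h]

theorem pvPhrase_inj {dict : List (List Char)} {p q : Int} (hnd : dict.Nodup)
    (hne : ∀ s ∈ dict, s ≠ []) (hp0 : 0 ≤ p) (hp1 : p ≤ (dict.length : Int))
    (hq0 : 0 ≤ q) (hq1 : q ≤ (dict.length : Int))
    (h : pvPhrase dict p = pvPhrase dict q) : p = q := by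
  by_cases hp : p = 0
  · by_cases hq : q = 0
    · omega
    · exfalso
      apply hne _ (pvPhrase_mem hq0 hq1 hq)
      rw [← h, hp]; simp [pvPhrase]
  · by_cases hq : q = 0
    · exfalso
      apply hne _ (pvPhrase_mem hp0 hp1 hp)
      rw [h, hq]; simp [pvPhrase]
    · have hpl : (p - 1).toNat < dict.length := by omega
      have hql : (q - 1).toNat < dict.length := by omega
      unfold pvPhrase at h
      rw [if_neg hp, if_neg hq, List.getD_eq_getElem _ _ hpl,
        List.getD_eq_getElem _ _ hql] at h
      have := (List.Nodup.getElem_inj_iff hnd).mp h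
      omega

theorem pvPhrase_append {dict : List (List Char)} {p : Int} (x : List Char)
    (h0 : 0 ≤ p) (h1 : p ≤ (dict.length : Int)) :
    pvPhrase (dict ++ [x]) p = pvPhrase dict p := by
  unfold pvPhrase
  by_cases hp : p = 0
  · simp [hp]
  · rw [if_neg hp, if_neg hp]
    have hlt : (p - 1).toNat < dict.length := by omega
    rw [List.getD_eq_getElem _ _ hlt, List.getD_eq_getElem _ _ (by
      simp; omega), List.getElem_append_left hlt]

theorem pvPhrase_last {dict : List (List Char)} (x : List Char) :
    pvPhrase (dict ++ [x]) ((dict.length : Int) + 1) = x := by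
  unfold pvPhrase
  rw [if_neg (by omega)]
  have : ((dict.length : Int) + 1 - 1).toNat = dict.length := by omega
  rw [this, List.getD_eq_getElem _ _ (by simp), List.getElem_append_right (by omega)]
  simp

theorem pvLastD_append (l : List Char) (c : Char) : pvLastD (l ++ [c]) = c := by
  simp [pvLastD]

-- the inductive step invariant transfer: the main loop lemma
theorem pvLoopRel (cs : List Char) : ∀ tb cw dict sub cur lb, PvInv tb dict sub cur lb →
    pvRel (pvALoop cs sub cw dict cur) (pvBLoop cs tb cw dict cur lb) := by
  induction cs with
  | nil =>
    intro tb cw dict sub cur lb hinv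
    exact ⟨rfl, rfl, rfl, hinv⟩
  | cons c rest ih =>
    intro tb cw dict sub cur lb hinv
    have hget : tb.get? (cur, c) =
        (PySem.List.index? dict (sub ++ [c])).map (fun j => ((j : Int) + 1)) := by
      rw [hinv.h5 cur c hinv.h0a hinv.h0b, ← hinv.h3]
    by_cases hmem : (sub ++ [c]) ∈ dict
    · -- found in the dictionary: A extends SubSet, B walks down the trie
      obtain ⟨j, hj⟩ := (PySem.List.index?_isSome_iff (xs := dict) (v := sub ++ [c])).mpr hmem
        |> Option.isSome_iff_exists.mp
      obtain ⟨hjlt, hjval, _⟩ := PySem.List.getElem_of_index?_eq_some hj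
      rw [PySem.List.index?_eq_idxOf?] at hj
      have hA : pvALoop (c :: rest) sub cw dict cur =
          pvALoop rest (sub ++ [c]) cw dict ((j : Int) + 1) := by
        simp [pvALoop, hmem, hj]
      have hB : pvBLoop (c :: rest) tb cw dict cur lb =
          pvBLoop rest tb cw dict ((j : Int) + 1) c := by
        simp [pvBLoop, hget, hj]
      rw [hA, hB]
      apply ih
      refine ⟨by omega, by omega, hinv.h1, hinv.h2, ?_, ?_, hinv.h5, hinv.h6, hinv.h7⟩
      · unfold pvPhrase
        rw [if_neg (by omega)]
        have : ((j : Int) + 1 - 1).toNat = j := by omega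
        rw [this, List.getD_eq_getElem _ _ hjlt, hjval]
      · intro _; exact pvLastD_append sub c
    · -- a new phrase: A appends to dictionary/codewords, B adds a trie edge
      have hnone : PySem.List.index? dict (sub ++ [c]) = none :=
        (PySem.List.index?_eq_none_iff _ _).mpr hmem
      have hA : pvALoop (c :: rest) sub cw dict cur =
          pvALoop rest [] (cw ++ [PySem.Int.toChars cur ++ [c]]) (dict ++ [sub ++ [c]]) 0 := by
        simp [pvALoop, hmem, pvLastD_append]
      have hBdict : (if cur = 0 then [] else
          (PySem.List.pyGet? dict (cur - 1)).getD []) ++ [c] = sub ++ [c] := by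
        congr 1
        rw [hinv.h3]
        unfold pvPhrase
        by_cases hc : cur = 0
        · simp [hc]
        · rw [if_neg hc, if_neg hc]
          have hc0 := hinv.h0a
          have h01 : cur - 1 = (((cur - 1).toNat : Nat) : Int) := by omega
          have hlt : (cur - 1).toNat < dict.length := by
            have := hinv.h0b; omega
          rw [h01, PySem.List.pyGet?_natCast, List.getElem?_eq_getElem hlt]
          simp [List.getElem?_eq_getElem (show cur.toNat - 1 < dict.length by omega)]
      have hB : pvBLoop (c :: rest) tb cw dict cur lb =
          pvBLoop rest (tb.insert (cur, c) ((dict.length : Int) + 1))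
            (cw ++ [PySem.Int.toChars cur ++ [c]]) (dict ++ [sub ++ [c]]) 0 lb := by
        have hnone' := hnone
        rw [PySem.List.index?_eq_idxOf?] at hnone'
        simp [pvBLoop, hget, hnone', hBdict]
      rw [hA, hB]
      apply ih
      set x := sub ++ [c] with hx
      have hxne : x ≠ [] := by simp [hx]
      have hsub : sub = pvPhrase dict cur := hinv.h3
      constructor
      · omega
      · simp; omega
      · exact List.Nodup.append hinv.h1 (List.nodup_singleton _)
          (by simpa using hmem)
      · intro s hs
        rcases List.mem_append.mp hs with h | h
        · exact hinv.h2 s h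
        · simp at h; subst h; exact hxne
      · simp [pvPhrase]
      · intro h; exact absurd rfl h
      · -- the trie-edge table stays in sync with dictionary indices
        intro p c' hp0 hp1
        by_cases hpl : p = (dict.length : Int) + 1
        · -- the fresh index: no outgoing edges yet, and no extension is a phrase
          subst hpl
          rw [PySem.Dict.get?_insert_of_ne _ _ (by
            intro he
            injection he with he1 he2
            have := hinv.h0b
            omega)]
          have hnotsome : ¬ (tb.get? ((dict.length : Int) + 1, c')).isSome := by
            intro h
            have := (hinv.h6 _ c' h).2
            omega
          have hLHS : tb.get? ((dict.length : Int) + 1, c') = none := by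
            cases h : tb.get? ((dict.length : Int) + 1, c')
            · rfl
            · exact absurd (by simp [h]) hnotsome
          rw [hLHS, pvPhrase_last]
          have hxc : (x ++ [c']) ∉ dict ++ [x] := by
            intro h
            rcases List.mem_append.mp h with h | h
            · rcases hinv.h7 _ h with h' | h'
              · rw [List.dropLast_concat] at h'; exact hxne h'
              · rw [List.dropLast_concat] at h'; exact hmem (hx ▸ h')
            · simp at h
          rw [(PySem.List.index?_eq_none_iff _ _).mpr hxc]
          rfl
        · have hple : p ≤ (dict.length : Int) := by
            simp only [List.length_append, List.length_cons, List.length_nil] at hp1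
            push_cast at hp1
            omega
          rw [pvPhrase_append x hp0 hple]
          by_cases hkey : (p, c') = (cur, c)
          · injection hkey with hk1 hk2
            subst hk1; subst hk2
            rw [PySem.Dict.get?_insert_self, ← hsub, ← hx,
              PySem.List.index?_append_singleton_self _ _ hmem]
            simp
          · rw [PySem.Dict.get?_insert_of_ne _ _ hkey,
              hinv.h5 p c' hp0 hple]
            cases hidx : PySem.List.index? dict (pvPhrase dict p ++ [c']) with
            | some j =>
              rw [PySem.List.index?_append_of_mem _
                ((PySem.List.index?_isSome_iff _ _).mp (by rw [hidx]; rfl)), hidx]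
            | none =>
              have hnm : pvPhrase dict p ++ [c'] ∉ dict :=
                (PySem.List.index?_eq_none_iff _ _).mp hidx
              have hnx : pvPhrase dict p ++ [c'] ≠ x := by
                intro he
                rw [hx] at he
                have hc' : c' = c := by
                  have := congrArg pvLastD he
                  rwa [pvLastD_append, pvLastD_append] at this
                have hq : pvPhrase dict p = sub := by
                  have := congrArg List.dropLast he
                  rwa [List.dropLast_concat, List.dropLast_concat] at this
                apply hkey
                rw [hc']
                have : p = cur := pvPhrase_inj hinv.h1 hinv.h2 hp0 hple
                  hinv.h0a hinv.h0b (hq.trans hsub)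
                rw [this]
              have : pvPhrase dict p ++ [c'] ∉ dict ++ [x] := by
                intro h
                rcases List.mem_append.mp h with h | h
                · exact hnm h
                · simp at h; exact hnx h
              rw [(PySem.List.index?_eq_none_iff _ _).mpr this]
      · -- key-domain bound
        intro p c' hsome
        by_cases hkey : (p, c') = (cur, c)
        · injection hkey with hk1 _
          subst hk1
          have := hinv.h0a; have := hinv.h0b
          constructor <;> [omega; (simp; omega)]
        · rw [PySem.Dict.get?_insert_of_ne _ _ hkey] at hsome
          have := hinv.h6 p c' hsome
          constructor <;> [omega; (simp; omega)]
      · -- prefix closure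
        intro s hs
        rcases List.mem_append.mp hs with h | h
        · rcases hinv.h7 s h with h' | h'
          · exact Or.inl h'
          · exact Or.inr (List.mem_append.mpr (Or.inl h'))
        · simp at h; subst h
          rw [List.dropLast_concat]
          by_cases hc : cur = 0
          · left; rw [hsub]; simp [pvPhrase, hc]
          · right
            exact List.mem_append.mpr (Or.inl (hsub ▸ pvPhrase_mem hinv.h0a hinv.h0b hc))

theorem pvInvInit : PvInv PySem.Dict.empty [] [] 0 ' ' := by
  refine ⟨le_refl 0, by simp, List.nodup_nil, by simp, by simp [pvPhrase], by simp, ?_, ?_, by simp⟩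
  · intro p c _ _
    simp [PySem.Dict.get?_empty]
  · intro p c h
    simp [PySem.Dict.get?_empty] at h

-- ===== VERDICT (by name: the statement is the Claim_ definition above) =====
theorem LempelZivEncodeChar_spec : Claim_equal_LempelZivEncodeChar := by
  unfold Claim_equal_LempelZivEncodeChar
  intro Data _
  unfold Spec_LempelZivEncodeChar LempelZivEncodeChar LempelZivEncodeChar_alt
  have h := pvLoopRel Data.toList PySem.Dict.empty [] [] [] 0 ' ' pvInvInit
  rcases hA : pvALoop Data.toList [] [] [] 0 with ⟨cwA, dA, subA, liA⟩
  rcases hB : pvBLoop Data.toList PySem.Dict.empty [] [] 0 ' ' with ⟨tbB, cwB, dB, curB, lbB⟩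
  rw [hA, hB] at h
  obtain ⟨e1, e2, e3, hinv⟩ := h
  simp only at e1 e2 e3
  dsimp only at hinv
  by_cases hc : curB = 0
  · have hsub0 : subA = [] := by rw [hinv.h3, hc]; simp [pvPhrase]
    simp [hc, hsub0, e1, e2]
  · have hsubne : subA ≠ [] := by
      rw [hinv.h3]
      intro h0
      exact hc ((pvPhrase_ne_nil hinv.h0a hinv.h0b hinv.h2).mp h0)
    have hl : pvLastD subA = lbB := hinv.h4 hsubne
    simp [hc, hsubne, e1, e2, e3, hl]
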